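-- pv_equiv track=rewrite | github.com/DavidRG25/TFG_APP_DOCKER-PASSIFY | paasify_app/containers/utils.py | filter_by_level
-- ===== SOURCE A (Python) =====
-- from typing import List, Tuple
--
-- def filter_by_level(logs: List[str], level: str) -> List[str]:
--     if not level or level == 'ALL': return logs
--     lvl = level.upper()
--
--     patterns = {
--         'ERROR': ['error', 'fatal', 'critical', 'fail', '[err]', '(err)'],
--         'WARN': ['warn', 'warning', '[wrn]', '(wrn)'],
--         'INFO': ['info'],
--         'DEBUG': ['debug']
--     }
--     keywords = patterns.get(lvl, [lvl.lower()])
--     return [l for l in logs if any(k in l.lower() for k in keywords)]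
-- ===== SOURCE B (Python) =====
-- from typing import List
--
-- def filter_by_level(logs: List[str], level: str) -> List[str]:
--     if not level or level == 'ALL': return logs
--     lvl = level.upper()
--
--     patterns = {
--         'ERROR': ['error', 'fatal', 'critical', 'fail', '[err]', '(err)'],
--         'WARN': ['warn', 'warning', '[wrn]', '(wrn)'],
--         'INFO': ['info'],
--         'DEBUG': ['debug']
--     }
--     keywords = patterns.get(lvl, [lvl.lower()])
--
--     def matches(s: str) -> bool:
--         # naive multi-pattern scan: walk the lowered line once and test every
--         # keyword for a match starting at the current position
--         for i in range(len(s)):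
--             for k in keywords:
--                 if s.startswith(k, i):
--                     return True
--         return False
--
--     result = []
--     for line in logs:
--         if matches(line.lower()):
--             result.append(line)
--     return result
-- ===== Notes on version B (the rewrite author's own statement) =====
-- stated objective: alternative
-- what changed: Replaced the per-keyword library substring search (any(k in l.lower())) by a hand-rolled naive multi-pattern matcher: each lowered line is scanned left-to-right once, testing every keyword for a match anchored at the current position, and the result list is built with an explicit accumulator loop instead of a comprehension.
import Mathlib
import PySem

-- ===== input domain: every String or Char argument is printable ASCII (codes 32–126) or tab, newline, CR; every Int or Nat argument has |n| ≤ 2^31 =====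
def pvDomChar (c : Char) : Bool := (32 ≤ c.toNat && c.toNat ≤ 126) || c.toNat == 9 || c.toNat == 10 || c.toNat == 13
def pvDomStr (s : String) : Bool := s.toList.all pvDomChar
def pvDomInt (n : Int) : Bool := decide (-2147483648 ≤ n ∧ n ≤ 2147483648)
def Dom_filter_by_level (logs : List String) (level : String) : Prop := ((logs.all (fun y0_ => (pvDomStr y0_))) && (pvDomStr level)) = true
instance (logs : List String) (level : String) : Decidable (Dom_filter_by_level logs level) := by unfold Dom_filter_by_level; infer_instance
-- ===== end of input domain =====

-- B replaces the per-keyword library substring search by a hand-rolled anchored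
-- position scan of each lowered line (naive multi-pattern matching) with an
-- explicit accumulator loop; alternative algorithm, no speed claim.

-- ===== PORT A =====
def fblPatterns : PySem.Dict String (List String) :=
  PySem.Dict.ofList
    [("ERROR", ["error", "fatal", "critical", "fail", "[err]", "(err)"]),
     ("WARN", ["warn", "warning", "[wrn]", "(wrn)"]),
     ("INFO", ["info"]),
     ("DEBUG", ["debug"])]

def filter_by_level (logs : List String) (level : String) : List String :=
  if level = "" ∨ level = "ALL" then logs
  else
    let lvl := PySem.Str.upper level
    let keywords := fblPatterns.getD lvl [PySem.Str.lower lvl]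
    logs.filter (fun l => keywords.any (fun k => PySem.Str.isIn k (PySem.Str.lower l)))

-- ===== PORT B =====
-- 'matches' in Source B; s.startswith(k, i) with 0 ≤ i < len(s) is exactly
-- "k.toList is a prefix of s.drop i" (Python treats i as a slice start).
def fblMatches (keywords : List String) (s : List Char) : Bool :=
  (List.range s.length).any (fun i =>
    keywords.any (fun k => PySem.Chars.startswith (s.drop i) k.toList))

def filter_by_level_alt (logs : List String) (level : String) : List String :=
  if level = "" ∨ level = "ALL" then logs
  else
    let lvl := PySem.Str.upper level
    let keywords := fblPatterns.getD lvl [PySem.Str.lower lvl]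
    logs.foldl (fun acc line =>
      if fblMatches keywords (PySem.Str.lower line).toList then acc ++ [line] else acc) []

-- ===== PRECONDITION & SPEC =====
def Spec_filter_by_level (logs : List String) (level : String) (out : List String) : Prop := out = filter_by_level_alt logs level
instance (logs : List String) (level : String) (out : List String) : Decidable (Spec_filter_by_level logs level out) := by unfold Spec_filter_by_level; infer_instance

-- ===== CLAIM (what is proved, stated in full; the proofs are below) =====
def Claim_equal_filter_by_level : Prop := ∀ (logs : List String) (level : String), Dom_filter_by_level logs level → Spec_filter_by_level logs level (filter_by_level logs level)

-- ===== LEMMAS AND PROOFS =====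

-- every keyword the two programs select is a nonempty string
theorem fbl_keywords_ne_nil (level : String) (h : level ≠ "") (k : String)
    (hk : k ∈ fblPatterns.getD (PySem.Str.upper level) [PySem.Str.lower (PySem.Str.upper level)]) :
    k.toList ≠ [] := by
  have hlen : PySem.Chars.lower (PySem.Chars.upper level.toList) ≠ [] := by
    simp only [PySem.Chars.lower, PySem.Chars.upper, ne_eq, List.map_eq_nil_iff]
    exact fun hn => h (String.toList_eq_nil_iff.mp hn)
  -- the literal dict lookup is a chain of four key comparisons
  rw [PySem.Dict.getD_eq_get?_getD,
    show fblPatterns =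
      PySem.Dict.mk [("ERROR", ["error", "fatal", "critical", "fail", "[err]", "(err)"]),
        ("WARN", ["warn", "warning", "[wrn]", "(wrn)"]), ("INFO", ["info"]), ("DEBUG", ["debug"])] from rfl] at hk
  simp only [PySem.Dict.get?_mk_cons] at hk
  split_ifs at hk
  · simp at hk; rcases hk with rfl | rfl | rfl | rfl | rfl | rfl <;> decide
  · simp at hk; rcases hk with rfl | rfl | rfl | rfl <;> decide
  · simp at hk; subst hk; decide
  · simp at hk; subst hk; decide
  · -- fallback: the single keyword is lower(upper(level)), nonempty since level ≠ ""
    simp [PySem.Dict.get?] at hk; subst hk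
    simpa [PySem.Str.toList_lower, PySem.Str.toList_upper] using hlen

-- the anchored position scan finds exactly the lines some keyword occurs in
theorem fblMatches_eq_any_isIn (keywords : List String) (s : List Char)
    (hne : ∀ k ∈ keywords, k.toList ≠ []) :
    fblMatches keywords s = keywords.any (fun k => PySem.Chars.isIn k.toList s) := by
  unfold fblMatches
  rw [Bool.eq_iff_iff]
  simp only [List.any_eq_true, List.mem_range, PySem.Chars.startswith_iff]
  constructor
  · rintro ⟨i, _, k, hk, hpre⟩
    exact ⟨k, hk, (PySem.Chars.exists_prefix_drop_iff_isIn _ _).mp ⟨i, hpre⟩⟩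
  · rintro ⟨k, hk, hin⟩
    obtain ⟨j, hpre⟩ := (PySem.Chars.exists_prefix_drop_iff_isIn _ _).mpr hin
    have hj : j < s.length := by
      by_contra hge
      push Not at hge
      rw [List.drop_eq_nil_of_le hge] at hpre
      exact hne k hk (List.prefix_nil.mp hpre)
    exact ⟨j, hj, k, hk, hpre⟩

-- ===== VERDICT (by name: the statement is the Claim_ definition above) =====
theorem filter_by_level_spec : Claim_equal_filter_by_level := by
  intro logs level _
  unfold Spec_filter_by_level filter_by_level filter_by_level_alt
  split_ifs with hguard
  · rfl
  · push Not at hguard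
    dsimp only
    have hfold := PySem.List.foldl_append_if
        (fun line => fblMatches
          (fblPatterns.getD (PySem.Str.upper level) [PySem.Str.lower (PySem.Str.upper level)])
          (PySem.Str.lower line).toList)
        id logs []
    simp only [id_eq, List.nil_append, List.map_id] at hfold
    rw [hfold]
    apply List.filter_congr
    intro l _
    rw [fblMatches_eq_any_isIn _ _ (fun k hk => fbl_keywords_ne_nil level hguard.1 k hk)]
    simp only [PySem.Str.isIn_eq, PySem.Str.toList_lower]
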